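-- pv_equiv track=rewrite | github.com/WKD622/python-project-1 | src/main.py | dictionarie_to_list
-- ===== SOURCE A (Python) =====
-- def dictionarie_to_list(dictionarie):
--     string = []
--     for key in dictionarie.keys():
--         if dictionarie[key] == '1':
--             string.append(key)
--             string.append('*')
--         elif dictionarie[key] == '0':
--             string.append('~')
--             string.append(key)
--             string.append('*')
--     del [string[-1]]
--     return string
-- ===== SOURCE B (Python) =====
-- def dictionarie_to_list(dictionarie):
--     segments = []
--     for key, value in dictionarie.items():
--         if value == '1':
--             segments.append([key])
--         elif value == '0':
--             segments.append(['~', key])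
--     result = list(segments[0])
--     for seg in segments[1:]:
--         result.append('*')
--         result.extend(seg)
--     return result
-- ===== Notes on version B (the rewrite author's own statement) =====
-- stated objective: alternative
-- what changed: B builds per-key token segments in a first pass and then joins them with '*' separators in a second pass, instead of A's single pass that appends a trailing '*' after every group and deletes the last element.
import Mathlib
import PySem

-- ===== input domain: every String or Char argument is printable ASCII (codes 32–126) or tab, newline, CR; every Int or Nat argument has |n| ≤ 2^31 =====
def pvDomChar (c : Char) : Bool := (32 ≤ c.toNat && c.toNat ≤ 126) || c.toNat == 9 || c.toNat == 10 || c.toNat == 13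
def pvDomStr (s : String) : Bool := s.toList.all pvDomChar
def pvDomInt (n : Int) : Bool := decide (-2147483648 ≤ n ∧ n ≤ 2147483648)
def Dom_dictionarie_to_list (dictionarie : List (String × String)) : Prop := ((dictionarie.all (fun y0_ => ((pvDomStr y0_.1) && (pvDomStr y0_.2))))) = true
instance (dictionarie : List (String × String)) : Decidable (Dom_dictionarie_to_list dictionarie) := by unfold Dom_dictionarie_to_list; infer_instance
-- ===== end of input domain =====

-- B joins per-key token segments with '*' separators in a second pass instead of
-- A's trailing-'*' append followed by deleting the last element (objective: alternative).

-- ===== PORT A =====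
-- The dict becomes an association list with distinct keys; iterating keys() and
-- looking each key up is iterating the pairs. 'del string[-1]' raises IndexError
-- on an empty list — those inputs are excluded by Pre_; dropLast is exact elsewhere.
def dictionarie_to_list (dictionarie : List (String × String)) : List String :=
  (dictionarie.foldl (fun string kv =>
      if kv.2 = "1" then string ++ [kv.1] ++ ["*"]
      else if kv.2 = "0" then string ++ ["~"] ++ [kv.1] ++ ["*"]
      else string) []).dropLast

-- ===== PORT B =====
-- 'segments[0]' raises IndexError on an empty segment list — outside Pre_.
def dictionarie_to_list_alt (dictionarie : List (String × String)) : List String :=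
  let segments := dictionarie.foldl (fun segs kv =>
      if kv.2 = "1" then segs ++ [[kv.1]]
      else if kv.2 = "0" then segs ++ [["~", kv.1]]
      else segs) ([] : List (List String))
  match segments with
  | [] => []
  | s :: rest => rest.foldl (fun result seg => result ++ ["*"] ++ seg) s

-- ===== PRECONDITION & SPEC =====
-- Pre_ excludes exactly the dicts with no '0' or '1' value, where A's 'del string[-1]'
-- (and B's 'segments[0]') raises IndexError.
def Pre_dictionarie_to_list (dictionarie : List (String × String)) : Prop :=
  ∃ p ∈ dictionarie, p.2 = "1" ∨ p.2 = "0"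
instance (dictionarie : List (String × String)) : Decidable (Pre_dictionarie_to_list dictionarie) := by unfold Pre_dictionarie_to_list; infer_instance

def pvWitness_dictionarie_to_list : (List (String × String)) := [("a", "1"), ("b", "0"), ("c", "x")]

def Spec_dictionarie_to_list (dictionarie : List (String × String)) (out : List String) : Prop := out = dictionarie_to_list_alt dictionarie
instance (dictionarie : List (String × String)) (out : List String) : Decidable (Spec_dictionarie_to_list dictionarie out) := by unfold Spec_dictionarie_to_list; infer_instance

-- ===== CLAIM (what is proved, stated in full; the proofs are below) =====
def Claim_equal_dictionarie_to_list : Prop := ∀ (dictionarie : List (String × String)), Dom_dictionarie_to_list dictionarie → Pre_dictionarie_to_list dictionarie → Spec_dictionarie_to_list dictionarie (dictionarie_to_list dictionarie)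

-- ===== LEMMAS AND PROOFS =====

-- per-key token group of A, and per-key segment of B
def pvTokA (kv : String × String) : List String :=
  if kv.2 = "1" then [kv.1, "*"] else if kv.2 = "0" then ["~", kv.1, "*"] else []
def pvSegB (kv : String × String) : List (List String) :=
  if kv.2 = "1" then [[kv.1]] else if kv.2 = "0" then [["~", kv.1]] else []

theorem pvTokA_eq (kv : String × String) :
    pvTokA kv = (pvSegB kv).flatMap (fun t => t ++ ["*"]) := by
  unfold pvTokA pvSegB; split_ifs <;> rfl

theorem flatMap_tok_eq (d : List (String × String)) :
    d.flatMap pvTokA = (d.flatMap pvSegB).flatMap (fun t => t ++ ["*"]) := by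
  induction d with
  | nil => rfl
  | cons kv rest ih => simp [List.flatMap_cons, ih, pvTokA_eq]

theorem a_eq_flatMap (d : List (String × String)) :
    dictionarie_to_list d = ((d.flatMap pvSegB).flatMap (fun t => t ++ ["*"])).dropLast := by
  unfold dictionarie_to_list
  have : ∀ (acc : List String),
      d.foldl (fun string kv =>
        if kv.2 = "1" then string ++ [kv.1] ++ ["*"]
        else if kv.2 = "0" then string ++ ["~"] ++ [kv.1] ++ ["*"]
        else string) acc = acc ++ d.flatMap pvTokA := by
    induction d with
    | nil => intro acc; simp
    | cons kv rest ih =>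
      intro acc
      simp only [List.foldl_cons, List.flatMap_cons, ih, pvTokA]
      split_ifs <;> simp
  rw [this, List.nil_append, flatMap_tok_eq]

theorem b_segments (d : List (String × String)) (acc : List (List String)) :
    d.foldl (fun segs kv =>
      if kv.2 = "1" then segs ++ [[kv.1]]
      else if kv.2 = "0" then segs ++ [["~", kv.1]]
      else segs) acc = acc ++ d.flatMap pvSegB := by
  induction d generalizing acc with
  | nil => simp
  | cons kv rest ih =>
    simp only [List.foldl_cons, List.flatMap_cons, ih, pvSegB]
    split_ifs <;> simp

theorem interleave (s : List String) (rest : List (List String)) :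
    ((s :: rest).flatMap (fun t => t ++ ["*"])).dropLast =
      rest.foldl (fun result seg => result ++ ["*"] ++ seg) s := by
  induction rest generalizing s with
  | nil => simp
  | cons t rs ih =>
    simp only [List.flatMap_cons, List.foldl_cons]
    have h := ih (s ++ ["*"] ++ t)
    simp only [List.flatMap_cons] at h
    simpa [List.append_assoc] using h

theorem segs_ne_nil (d : List (String × String)) (h : Pre_dictionarie_to_list d) :
    d.flatMap pvSegB ≠ [] := by
  obtain ⟨p, hp, hv⟩ := h
  intro hnil
  rw [List.flatMap_eq_nil_iff] at hnil
  have := hnil p hp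
  unfold pvSegB at this
  rcases hv with h1 | h0
  · simp [h1] at this
  · simp [h0] at this

-- ===== VERDICT (by name: the statement is the Claim_ definition above) =====
theorem dictionarie_to_list_spec : Claim_equal_dictionarie_to_list := by
  intro d _ hpre
  unfold Spec_dictionarie_to_list
  rw [a_eq_flatMap]
  unfold dictionarie_to_list_alt
  rw [b_segments, List.nil_append]
  cases hsegs : d.flatMap pvSegB with
  | nil => exact absurd hsegs (segs_ne_nil d hpre)
  | cons s rest => exact interleave s rest
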